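-- pv_equiv track=rewrite | github.com/DimaErmakov/CAPS | manual.py | count_valid_words
-- ===== SOURCE A (Python) =====
-- def count_valid_words(decrypted_text, valid_words):
--     word_count = 0
--     for word_length in range(3, 11):  # Adjust range based on expected word lengths
--         for i in range(0, len(decrypted_text) - word_length + 1):
--             word = decrypted_text[i : i + word_length]
--             if word in valid_words:
--                 word_count += 1
--     return word_count
-- ===== SOURCE B (Python) =====
-- def count_valid_words(decrypted_text, valid_words):
--     # Invert the loops: for each distinct dictionary word of length 3-10, count its
--     # overlapping occurrences in the text with repeated str.find calls.
--     total = 0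
--     for w in set(valid_words):
--         if 3 <= len(w) <= 10:
--             pos = decrypted_text.find(w)
--             while pos != -1:
--                 total += 1
--                 pos = decrypted_text.find(w, pos + 1)
--     return total
-- ===== Notes on version B (the rewrite author's own statement) =====
-- stated objective: alternative
-- what changed: Inverted the decomposition: instead of generating every length-3..10 window of the text and testing it for membership in the word set, B iterates over the distinct dictionary words of length 3..10 and counts each word's overlapping occurrences with a repeated str.find scan.
import Mathlib
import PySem

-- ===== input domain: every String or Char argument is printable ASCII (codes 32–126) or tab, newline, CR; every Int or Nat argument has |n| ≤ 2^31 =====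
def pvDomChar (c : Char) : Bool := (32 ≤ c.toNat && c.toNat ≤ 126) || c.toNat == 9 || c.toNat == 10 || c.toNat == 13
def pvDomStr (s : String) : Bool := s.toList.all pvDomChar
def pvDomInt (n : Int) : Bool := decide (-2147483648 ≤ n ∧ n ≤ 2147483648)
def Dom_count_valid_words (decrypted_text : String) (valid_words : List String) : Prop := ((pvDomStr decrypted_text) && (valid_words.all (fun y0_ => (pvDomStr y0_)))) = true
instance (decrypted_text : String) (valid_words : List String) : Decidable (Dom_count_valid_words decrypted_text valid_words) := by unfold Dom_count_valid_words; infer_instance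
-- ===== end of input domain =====

-- B inverts the two loops: instead of testing every length-3..10 window of the text for
-- membership in the word set, it counts, per distinct word of length 3..10, the window
-- positions where that word occurs; same total (alternative decomposition).

-- ===== PORT A =====
def count_valid_words (decrypted_text : String) (valid_words : List String) : Int :=
  (PySem.List.pyRange 3 11 1).foldl (fun word_count word_length =>
    (PySem.List.pyRange 0 (PySem.Str.len decrypted_text - word_length + 1) 1).foldl
      (fun word_count i =>
        if PySem.Str.slice decrypted_text (some i) (some (i + word_length)) ∈ valid_words
        then word_count + 1 else word_count) word_count) 0

-- ===== PORT B =====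
-- B's 'while pos != -1' loop; the fuel only makes the recursion structural (text length
-- bounds the number of hits), it never alters the computed value on the proved domain
def pvOccLoop (s w : String) : Nat → Int → Int → Int
  | 0, _, acc => acc
  | fuel + 1, pos, acc =>
    if pos = -1 then acc
    else pvOccLoop s w fuel (PySem.Str.findFrom s w (pos + 1) none) (acc + 1)

def count_valid_words_alt (decrypted_text : String) (valid_words : List String) : Int :=
  (PySem.Set.ofList valid_words).foldl (fun total w =>
    if 3 ≤ PySem.Str.len w ∧ PySem.Str.len w ≤ 10 then
      pvOccLoop decrypted_text w (decrypted_text.toList.length + 1)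
        (PySem.Str.find decrypted_text w) total
    else total) 0

-- ===== PRECONDITION & SPEC =====
def Spec_count_valid_words (decrypted_text : String) (valid_words : List String) (out : Int) : Prop := out = count_valid_words_alt decrypted_text valid_words
instance (decrypted_text : String) (valid_words : List String) (out : Int) : Decidable (Spec_count_valid_words decrypted_text valid_words out) := by unfold Spec_count_valid_words; infer_instance

-- ===== CLAIM (what is proved, stated in full; the proofs are below) =====
def Claim_equal_count_valid_words : Prop := ∀ (decrypted_text : String) (valid_words : List String), Dom_count_valid_words decrypted_text valid_words → Spec_count_valid_words decrypted_text valid_words (count_valid_words decrypted_text valid_words)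

-- ===== LEMMAS AND PROOFS =====

-- the window of the text starting at i with length L, as both ports slice it
def pvWin (s : String) (i L : Int) : String :=
  PySem.Str.slice s (some i) (some (i + L))

-- B's per-word occurrence count
def pvCB (s : String) (w : String) : Nat :=
  (PySem.List.pyRange 0 (PySem.Str.len s - PySem.Str.len w + 1) 1).countP
    (fun i => decide (pvWin s i (PySem.Str.len w) = w))

lemma pvLenWin (s : String) {i L : Int} (h0 : 0 ≤ i) (hL : 0 ≤ L)
    (hn : i + L ≤ PySem.Str.len s) : PySem.Str.len (pvWin s i L) = L := by
  have hn' : i + L ≤ (s.toList.length : Int) := by simpa [PySem.Str.len_eq] using hn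
  simp only [pvWin, PySem.Str.len_eq, PySem.Str.toList_slice, PySem.Chars.slice_eq_listSlice]
  rw [PySem.List.slice_toNat s.toList h0 (by omega)]
  simp only [List.length_take, List.length_drop]
  omega

lemma pvSumIndicator (D : List String) (hD : D.Nodup) (x : String) :
    (D.map (fun w => if x = w then (1 : Int) else 0)).sum = if x ∈ D then 1 else 0 := by
  induction D with
  | nil => simp
  | cons w D ih =>
    rcases List.nodup_cons.mp hD with ⟨hw, hD'⟩
    by_cases h : x = w
    · subst h
      simp [ih hD', hw]
    · simp [h, ih hD', List.mem_cons]

lemma pvSumItePyRange (b x v : Int) : ∀ (k : Nat) (a : Int), (b - a).toNat = k →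
    ((PySem.List.pyRange a b 1).map (fun L => if x = L then v else 0)).sum
      = if a ≤ x ∧ x < b then v else 0 := by
  intro k
  induction k with
  | zero =>
    intro a hk
    rw [PySem.List.pyRange_one_eq_nil (by omega)]
    simp
    omega
  | succ k ih =>
    intro a hk
    rw [PySem.List.pyRange_one_cons (by omega : a < b)]
    rw [List.map_cons, List.sum_cons, ih (a + 1) (by omega)]
    by_cases h : x = a
    · subst h
      rw [if_pos rfl, if_neg (by omega), if_pos (by omega)]
      ring
    · rw [if_neg h]
      by_cases h2 : a + 1 ≤ x ∧ x < b
      · rw [if_pos h2, if_pos (by omega)]; ring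
      · rw [if_neg h2, if_neg (by omega)]; ring

lemma pvSumComm {α β : Type} (l1 : List α) (l2 : List β) (f : α → β → Int) :
    (l1.map (fun a => (l2.map (fun b => f a b)).sum)).sum
      = (l2.map (fun b => (l1.map (fun a => f a b)).sum)).sum := by
  induction l1 with
  | nil => simp
  | cons a l1 ih =>
    simp only [List.map_cons, List.sum_cons, ih]
    rw [← PySem.List.sum_map_add_int]

lemma pvPointwise (s : String) (vw : List String) (L : Int) (hL : 0 ≤ L) (i : Int)
    (h0 : 0 ≤ i) (hn : i + L ≤ PySem.Str.len s) :
    ((PySem.Set.ofList vw).map (fun w =>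
        if PySem.Str.len w = L then (if pvWin s i L = w then (1 : Int) else 0) else 0)).sum
      = if pvWin s i L ∈ vw then 1 else 0 := by
  rw [List.map_congr_left (g := fun w => if pvWin s i L = w then (1 : Int) else 0) ?_]
  · rw [pvSumIndicator _ (PySem.Set.nodup_ofList vw)]
    by_cases h : pvWin s i L ∈ vw
    · rw [if_pos ((PySem.Set.mem_ofList vw _).mpr h), if_pos h]
    · rw [if_neg (fun hm => h ((PySem.Set.mem_ofList vw _).mp hm)), if_neg h]
  · intro w _
    by_cases h : pvWin s i L = w
    · have hlen : (w.length : Int) = L := by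
        simpa [PySem.Str.len_eq] using (h ▸ pvLenWin s h0 hL hn)
      simp [h, hlen]
    · simp [h]

lemma pvCntSplit (s : String) (vw : List String) (L : Int) (hL : 0 ≤ L) :
    (((PySem.List.pyRange 0 (PySem.Str.len s - L + 1) 1).countP
        (fun i => decide (pvWin s i L ∈ vw)) : Nat) : Int)
      = ((PySem.Set.ofList vw).map (fun w =>
          if PySem.Str.len w = L then (pvCB s w : Int) else 0)).sum := by
  rw [List.map_congr_left (g := fun w =>
    if PySem.Str.len w = L then
      (((PySem.List.pyRange 0 (PySem.Str.len s - L + 1) 1).countP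
        (fun i => decide (pvWin s i L = w)) : Nat) : Int) else 0) ?_]
  · have hrange : ∀ i ∈ PySem.List.pyRange 0 (PySem.Str.len s - L + 1) 1,
        0 ≤ i ∧ i + L ≤ PySem.Str.len s := by
      intro i hi
      have := PySem.List.mem_pyRange_one.mp hi
      omega
    revert hrange
    generalize (PySem.List.pyRange 0 (PySem.Str.len s - L + 1) 1) = l
    intro hrange
    induction l with
    | nil => simp
    | cons i l ih =>
      have hi := hrange i (List.mem_cons_self ..)
      have hl := fun j hj => hrange j (List.mem_cons_of_mem _ hj)
      simp only [List.countP_cons]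
      rw [List.map_congr_left (g := fun w =>
        (if PySem.Str.len w = L then
          (((l.countP (fun i => decide (pvWin s i L = w))) : Nat) : Int) else 0)
        + (if PySem.Str.len w = L then (if pvWin s i L = w then (1 : Int) else 0) else 0)) ?_]
      · rw [PySem.List.sum_map_add_int, ← ih hl,
          pvPointwise s vw L hL i hi.1 hi.2]
        by_cases h : pvWin s i L ∈ vw <;> simp [h]
      · intro w _
        by_cases h2 : pvWin s i L = w <;> by_cases h : (w.length : Int) = L <;>
          simp [h2, h]
  · intro w _
    by_cases h : PySem.Str.len w = L
    · simp only [pvCB, h]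
    · simp only [if_neg h]

lemma pvAEq (s : String) (vw : List String) :
    count_valid_words s vw
      = ((PySem.List.pyRange 3 11 1).map (fun L =>
          (((PySem.List.pyRange 0 (PySem.Str.len s - L + 1) 1).countP
              (fun i => decide (pvWin s i L ∈ vw)) : Nat) : Int))).sum := by
  unfold count_valid_words
  rw [PySem.List.foldl_congr_mem _ _ (fun acc L => acc +
      (((PySem.List.pyRange 0 (PySem.Str.len s - L + 1) 1).countP
          (fun i => decide (pvWin s i L ∈ vw)) : Nat) : Int)) 0 ?_]
  · rw [PySem.List.foldl_add, zero_add]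
  · intro acc L _
    simpa [pvWin] using
      PySem.List.foldl_ite_add_one (fun i => pvWin s i L ∈ vw)
        (PySem.List.pyRange 0 (PySem.Str.len s - L + 1) 1) acc

-- the while loop, started at findFrom(k), adds one per occurrence position in [k, n)
lemma pvLoopCount (s w : String) (hw : w.toList ≠ []) :
    ∀ (fuel k : Nat) (acc : Int), k ≤ s.toList.length →
      s.toList.length + 1 - k ≤ fuel →
    pvOccLoop s w fuel (PySem.Chars.findFrom s.toList w.toList (k : Int) none) acc
      = acc + ((PySem.List.pyRange (k : Int) (s.toList.length : Int) 1).countP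
          (fun j => decide (w.toList <+: s.toList.drop j.toNat)) : Int) := by
  intro fuel
  induction fuel with
  | zero => intro k acc hk hf; exact absurd hf (by omega)
  | succ fuel ih =>
    intro k acc hk hf
    by_cases hr : PySem.Chars.findFrom s.toList w.toList (k : Int) none = -1
    · rw [hr]
      have hno : ¬ w.toList <:+: s.toList.drop k :=
        (PySem.Chars.findFrom_natCast_eq_neg_one_iff s.toList w.toList k hk).mp hr
      rw [show pvOccLoop s w (fuel + 1) (-1) acc = acc from by simp [pvOccLoop]]
      rw [List.countP_eq_zero.mpr ?_]
      · simp
      · intro j hj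
        have hjm := PySem.List.mem_pyRange_one.mp hj
        simp only [decide_eq_true_eq]
        intro hp
        apply hno
        have hdd : s.toList.drop j.toNat = (s.toList.drop k).drop (j.toNat - k) := by
          rw [List.drop_drop]; congr 1; omega
        exact (hp.isInfix.trans (hdd ▸ (List.drop_suffix (j.toNat - k) _).isInfix))
    · obtain ⟨hkr, hpre, hmin⟩ :=
        PySem.Chars.findFrom_natCast_spec s.toList w.toList k hk hr
      set r := PySem.Chars.findFrom s.toList w.toList (k : Int) none with hrdef
      have hwpos : 1 ≤ w.toList.length := List.length_pos_iff.mpr hw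
      have hr0 : 0 ≤ r := le_trans (by positivity) hkr
      have hrn : r.toNat + w.toList.length ≤ s.toList.length := by
        have := hpre.length_le
        simp only [List.length_drop] at this
        omega
    -- one loop step, then the induction hypothesis from position r + 1
      rw [show pvOccLoop s w (fuel + 1) r acc
          = pvOccLoop s w fuel (PySem.Str.findFrom s w (r + 1) none) (acc + 1) from by
        simp [pvOccLoop, hr]]
      rw [PySem.Str.findFrom_eq, show r + 1 = ((r.toNat + 1 : Nat) : Int) by omega,
        ih (r.toNat + 1) (acc + 1) (by omega) (by omega)]
      have hkr' : k ≤ r.toNat := by omega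
      rw [PySem.List.pyRange_one_append (k : Int) r (s.toList.length : Int)
          (by omega) (by omega),
        List.countP_append,
        PySem.List.pyRange_one_cons (show r < (s.toList.length : Int) by omega),
        List.countP_cons]
      have hz : (PySem.List.pyRange (k : Int) r 1).countP
          (fun j => decide (w.toList <+: s.toList.drop j.toNat)) = 0 := by
        rw [List.countP_eq_zero]
        intro j hj
        have hjm := PySem.List.mem_pyRange_one.mp hj
        simp only [decide_eq_true_eq]
        exact hmin j.toNat (by omega) (by omega)
      have h1 : decide (w.toList <+: s.toList.drop r.toNat) = true := by
        simpa using hpre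
      rw [hz, show r + 1 = ((r.toNat + 1 : Nat) : Int) by omega, h1]
      simp only [if_pos trivial]
      push_cast
      ring

-- the window at j equals w iff w is a prefix of the text dropped at j
lemma pvPrefIff (s w : String) {j : Int} (h0 : 0 ≤ j) :
    pvWin s j (w.toList.length : Int) = w ↔ w.toList <+: s.toList.drop j.toNat := by
  rw [← String.toList_inj]
  simp only [pvWin, PySem.Str.toList_slice, PySem.Chars.slice_eq_listSlice]
  rw [PySem.List.slice_toNat s.toList h0 (by omega)]
  rw [show (j + (w.toList.length : Int)).toNat - j.toNat = w.toList.length by omega]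
  rw [List.prefix_iff_eq_take]
  constructor
  · intro h; exact h.symm
  · intro h; exact h.symm

-- the full run of the while loop counts exactly B's per-word occurrence count
lemma pvLoopEq (s w : String) (hw : 1 ≤ w.toList.length) (acc : Int) :
    pvOccLoop s w (s.toList.length + 1) (PySem.Str.find s w) acc
      = acc + (pvCB s w : Int) := by
  have h0 : PySem.Str.find s w
      = PySem.Chars.findFrom s.toList w.toList ((0 : Nat) : Int) none := by
    simp [PySem.Str.find_eq, PySem.Chars.findFrom_zero]
  rw [h0, pvLoopCount s w (by intro h; rw [h] at hw; simp at hw)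
    (s.toList.length + 1) 0 acc (by omega) (by omega)]
  congr 1
  unfold pvCB
  simp only [PySem.Str.len_eq, Nat.cast_zero]
  by_cases hLn : w.toList.length ≤ s.toList.length
  · rw [PySem.List.pyRange_one_append 0
      ((s.toList.length : Int) - (w.toList.length : Int) + 1) (s.toList.length : Int)
      (by omega) (by omega), List.countP_append]
    have hz : ((PySem.List.pyRange
        ((s.toList.length : Int) - (w.toList.length : Int) + 1)
        (s.toList.length : Int) 1).countP
          (fun j => decide (w.toList <+: s.toList.drop j.toNat))) = 0 := by
      rw [List.countP_eq_zero]
      intro j hj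
      have hjm := PySem.List.mem_pyRange_one.mp hj
      simp only [decide_eq_true_eq]
      intro hp
      have := hp.length_le
      simp only [List.length_drop] at this
      omega
    rw [hz, add_zero]
    norm_cast
    apply (List.countP_congr ?_).symm
    intro j hj
    have hjm := PySem.List.mem_pyRange_one.mp hj
    simp only [decide_eq_true_eq]
    exact pvPrefIff s w (by omega)
  · rw [show ((s.toList.length : Int) - (w.toList.length : Int) + 1) ≤ 0 by omega
        |> PySem.List.pyRange_one_eq_nil]
    rw [List.countP_eq_zero.mpr ?_]
    · simp
    · intro j hj
      have hjm := PySem.List.mem_pyRange_one.mp hj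
      simp only [decide_eq_true_eq]
      intro hp
      have := hp.length_le
      simp only [List.length_drop] at this
      omega

lemma pvBEq (s : String) (vw : List String) :
    count_valid_words_alt s vw
      = ((PySem.Set.ofList vw).map (fun w =>
          if 3 ≤ PySem.Str.len w ∧ PySem.Str.len w < 11 then (pvCB s w : Int) else 0)).sum := by
  unfold count_valid_words_alt
  rw [PySem.List.foldl_congr_mem _ _ (fun acc w => acc +
      (if 3 ≤ PySem.Str.len w ∧ PySem.Str.len w < 11 then (pvCB s w : Int) else 0)) 0 ?_]
  · rw [PySem.List.foldl_add, zero_add]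
  · intro acc w _
    by_cases hg : 3 ≤ PySem.Str.len w ∧ PySem.Str.len w ≤ 10
    · dsimp only
      rw [if_pos hg, if_pos (by omega : 3 ≤ PySem.Str.len w ∧ PySem.Str.len w < 11)]
      have hw : 1 ≤ w.toList.length := by
        have := hg.1
        rw [PySem.Str.len_eq] at this
        omega
      exact pvLoopEq s w hw acc
    · dsimp only
      rw [if_neg hg, if_neg (by omega : ¬(3 ≤ PySem.Str.len w ∧ PySem.Str.len w < 11))]
      ring

-- ===== VERDICT (by name: the statement is the Claim_ definition above) =====
theorem count_valid_words_spec : Claim_equal_count_valid_words := by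
  intro s vw _
  unfold Spec_count_valid_words
  rw [pvAEq, pvBEq]
  rw [List.map_congr_left (l := PySem.List.pyRange 3 11 1) (fun L hL => by
    have h3 : (3 : Int) ≤ L := (PySem.List.mem_pyRange_one.mp hL).1
    exact pvCntSplit s vw L (by omega))]
  rw [pvSumComm]
  refine congrArg List.sum (List.map_congr_left ?_)
  intro w _
  exact pvSumItePyRange 11 (PySem.Str.len w) (pvCB s w) 8 3 (by decide)
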